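-- pv_equiv track=rewrite | github.com/jasoncala/InstaCheck | InstaCheck.py | nofollowback
-- ===== SOURCE A (Python) =====
-- def nofollowback(followers, following):
-- 	followers.sort()
-- 	following.sort()
-- 	no_followback_list = []
-- 	for i in range(len(following)):
-- 		try:
-- 			followers.index(following[i])
-- 		except ValueError:
-- 			no_followback_list += [following[i]]
-- 	return no_followback_list
-- ===== SOURCE B (Python) =====
-- def nofollowback(followers, following):
-- 	followers.sort()
-- 	following.sort()
-- 	no_followback_list = []
-- 	j = 0
-- 	for x in following:
-- 		while j < len(followers) and followers[j] < x:
-- 			j += 1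
-- 		if not (j < len(followers) and followers[j] == x):
-- 			no_followback_list.append(x)
-- 	return no_followback_list
-- ===== Notes on version B (the rewrite author's own statement) =====
-- stated objective: faster
-- what changed: Replaces the per-element linear scan (followers.index inside the loop) with a single two-pointer merge walk over the two sorted lists; the matching pointer is not advanced on a match so duplicate following entries are handled identically.
import Mathlib
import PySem

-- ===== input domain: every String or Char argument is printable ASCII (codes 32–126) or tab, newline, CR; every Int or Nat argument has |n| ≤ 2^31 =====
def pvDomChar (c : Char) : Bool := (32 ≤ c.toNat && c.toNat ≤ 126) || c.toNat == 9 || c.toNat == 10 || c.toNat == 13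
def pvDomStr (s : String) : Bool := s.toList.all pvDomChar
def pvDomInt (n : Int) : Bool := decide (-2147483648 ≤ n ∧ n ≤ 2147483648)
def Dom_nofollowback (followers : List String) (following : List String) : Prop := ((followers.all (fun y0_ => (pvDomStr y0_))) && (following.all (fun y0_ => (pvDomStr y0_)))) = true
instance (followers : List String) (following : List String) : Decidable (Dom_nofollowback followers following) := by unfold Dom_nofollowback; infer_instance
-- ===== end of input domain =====

-- B replaces A's per-element linear scan (followers.index in the loop) by a single two-pointer
-- merge walk over both sorted lists: faster. Both Pythons sort the arguments in place identically;
-- the equivalence proved here is about the return value.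

-- ===== PORT A =====
def nofollowback (followers : List String) (following : List String) : List String :=
  let fb := PySem.List.sorted followers (fun x => x) false
  let fl := PySem.List.sorted following (fun x => x) false
  (List.range fl.length).foldl
    (fun acc i =>
      match PySem.List.index? fb (fl.getD i "") with
      | some _ => acc
      | none => acc ++ [fl.getD i ""]) []

-- ===== PORT B =====
-- inner 'while j < len(followers) and followers[j] < x: j += 1'
def nfbAdvance (fb : List String) (x : String) (j : Nat) : Nat :=
  match h : fb[j]? with
  | some y => if y < x then nfbAdvance fb x (j + 1) else j
  | none => j
termination_by fb.length - j
decreasing_by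
  have : j < fb.length := (List.getElem?_eq_some_iff.mp h).1
  omega

-- outer 'for x in following' loop carrying the pointer j
def nfbScan (fb : List String) (fl : List String) (j : Nat) : List String :=
  match fl with
  | [] => []
  | x :: rest =>
    let j' := nfbAdvance fb x j
    if fb[j']? = some x then nfbScan fb rest j'
    else x :: nfbScan fb rest j'

def nofollowback_alt (followers : List String) (following : List String) : List String :=
  let fb := PySem.List.sorted followers (fun x => x) false
  let fl := PySem.List.sorted following (fun x => x) false
  nfbScan fb fl 0

-- ===== PRECONDITION & SPEC =====
def Spec_nofollowback (followers : List String) (following : List String) (out : List String) : Prop := out = nofollowback_alt followers following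
instance (followers : List String) (following : List String) (out : List String) : Decidable (Spec_nofollowback followers following out) := by unfold Spec_nofollowback; infer_instance

-- ===== CLAIM (what is proved, stated in full; the proofs are below) =====
def Claim_equal_nofollowback : Prop := ∀ (followers : List String) (following : List String), Dom_nofollowback followers following → Spec_nofollowback followers following (nofollowback followers following)

-- ===== LEMMAS AND PROOFS =====

-- range-indexed foldl over getD is a foldl over the list itself
theorem foldl_range_getD {α β : Type} (g : β → α → β) (d : α) (l : List α) (acc : β) :
    (List.range l.length).foldl (fun b i => g b (l.getD i d)) acc = l.foldl g acc := by
  induction l using List.reverseRecOn generalizing acc with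
  | nil => rfl
  | append_singleton l x ih =>
    rw [List.length_append, List.length_singleton, List.range_succ, List.foldl_append,
      List.foldl_append]
    simp only [List.foldl_cons, List.foldl_nil]
    have h1 : (l ++ [x]).getD l.length d = x := by
      simp [List.getD_eq_getElem?_getD]
    have h2 : List.foldl (fun b i => g b ((l ++ [x]).getD i d)) acc (List.range l.length) =
        List.foldl (fun b i => g b (l.getD i d)) acc (List.range l.length) := by
      apply PySem.List.foldl_congr_mem
      intro b i hi
      rw [List.getD_append _ _ _ _ (List.mem_range.mp hi)]
    rw [h1, h2, ih]

-- A's loop body is a filter by non-membership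
theorem foldl_match_filter (fb : List String) (l : List String) (acc : List String) :
    l.foldl
      (fun acc x =>
        match PySem.List.index? fb x with
        | some _ => acc
        | none => acc ++ [x]) acc = acc ++ l.filter (fun x => decide (x ∉ fb)) := by
  induction l generalizing acc with
  | nil => simp
  | cons x rest ih =>
    rw [List.foldl_cons, List.filter_cons]
    cases h : PySem.List.index? fb x with
    | some k =>
      have hx : x ∈ fb := (PySem.List.index?_isSome_iff fb x).mp (by rw [h]; rfl)
      rw [ih, if_neg (by simp [hx])]
    | none =>
      have hx : x ∉ fb := (PySem.List.index?_eq_none_iff fb x).mp h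
      rw [ih, if_pos (by simp [hx])]
      simp

theorem nfbAdvance_lt (fb : List String) (x : String) (j : Nat) :
    ∀ k (hk : k < fb.length), j ≤ k → k < nfbAdvance fb x j → fb[k] < x := by
  fun_induction nfbAdvance fb x j with
  | case1 j y h hlt ih =>
    intro k hk hjk hkadv
    rcases Nat.eq_or_lt_of_le hjk with rfl | hlt'
    · rw [List.getElem?_eq_some_iff] at h
      obtain ⟨_, hy⟩ := h
      rw [hy]; exact hlt
    · exact ih k hk hlt' hkadv
  | case2 j y h hlt =>
    intro k hk hjk hkadv; omega
  | case3 j h =>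
    intro k hk hjk hkadv; omega

theorem nfbAdvance_stop (fb : List String) (x : String) (j : Nat) :
    ∀ (h : nfbAdvance fb x j < fb.length), ¬ fb[nfbAdvance fb x j] < x := by
  fun_induction nfbAdvance fb x j with
  | case1 j y h hlt ih => exact ih
  | case2 j y h hlt =>
    intro hlen
    rw [List.getElem?_eq_some_iff] at h
    obtain ⟨_, hy⟩ := h
    rw [hy]; exact hlt
  | case3 j h =>
    intro hlen
    exact absurd (List.getElem?_eq_some_iff.mpr ⟨hlen, rfl⟩) (by rw [h]; simp)

-- core correctness of the two-pointer walk on sorted lists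
theorem nfbScan_eq_filter (fb : List String) (hfb : fb.Pairwise (· ≤ ·)) :
    ∀ (fl : List String) (j : Nat), fl.Pairwise (· ≤ ·) →
      (∀ k (hk : k < fb.length), k < j → ∀ y ∈ fl, fb[k] < y) →
      nfbScan fb fl j = fl.filter (fun x => decide (x ∉ fb)) := by
  intro fl
  induction fl with
  | nil => intro j _ _; rfl
  | cons x rest ih =>
    intro j hsorted hinv
    have hx_le : ∀ y ∈ rest, x ≤ y := (List.pairwise_cons.mp hsorted).1
    have hrest : rest.Pairwise (· ≤ ·) := (List.pairwise_cons.mp hsorted).2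
    set j' := nfbAdvance fb x j with hj'
    -- every index below j' holds a value < x
    have hlt : ∀ k (hk : k < fb.length), k < j' → fb[k] < x := by
      intro k hk hkj'
      by_cases hjk : j ≤ k
      · exact nfbAdvance_lt fb x j k hk hjk hkj'
      · exact hinv k hk (by omega) x (List.mem_cons_self)
    -- fb[j']? = some x ↔ x ∈ fb
    have hmem : fb[j']? = some x ↔ x ∈ fb := by
      constructor
      · intro h
        exact List.mem_of_getElem? h
      · intro h
        obtain ⟨k, hk, hkx⟩ := List.mem_iff_getElem.mp h
        have hkge : j' ≤ k := by
          by_contra hcon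
          exact absurd hkx (ne_of_lt (hlt k hk (by omega)))
        have hj'len : j' < fb.length := lt_of_le_of_lt hkge hk
        have hle : fb[j'] ≤ fb[k] := by
          rcases Nat.eq_or_lt_of_le hkge with rfl | hltk
          · exact le_refl _
          · exact List.pairwise_iff_getElem.mp hfb j' k hj'len hk hltk
        have hge : ¬ fb[j'] < x := nfbAdvance_stop fb x j hj'len
        have : fb[j'] = x := le_antisymm (hkx ▸ hle) (not_lt.mp hge)
        rw [List.getElem?_eq_some_iff]
        exact ⟨hj'len, this⟩
    have hinv' : ∀ k (hk : k < fb.length), k < j' → ∀ y ∈ rest, fb[k] < y := by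
      intro k hk hkj' y hy
      exact lt_of_lt_of_le (hlt k hk hkj') (hx_le y hy)
    rw [nfbScan, List.filter_cons]
    by_cases hxfb : x ∈ fb
    · rw [if_pos (hmem.mpr hxfb)]
      simp only [hxfb, not_true_eq_false, decide_false, Bool.false_eq_true, if_false]
      exact ih j' hrest hinv'
    · rw [if_neg (fun h => hxfb (hmem.mp h))]
      simp only [hxfb, not_false_eq_true, decide_true, if_true]
      rw [ih j' hrest hinv']

-- ===== VERDICT (by name: the statement is the Claim_ definition above) =====
theorem nofollowback_spec : Claim_equal_nofollowback := by
  intro followers following _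
  unfold Spec_nofollowback nofollowback nofollowback_alt
  simp only
  set fb := PySem.List.sorted followers (fun x => x) false with hfb
  set fl := PySem.List.sorted following (fun x => x) false with hfl
  rw [foldl_range_getD (fun acc x =>
      match PySem.List.index? fb x with
      | some _ => acc
      | none => acc ++ [x]) "" fl [],
    foldl_match_filter, List.nil_append]
  have hfbp : fb.Pairwise (· ≤ ·) := by
    have := PySem.List.sorted_pairwise followers (fun x => x)
    simpa using this
  have hflp : fl.Pairwise (· ≤ ·) := by
    have := PySem.List.sorted_pairwise following (fun x => x)
    simpa using this
  rw [nfbScan_eq_filter fb hfbp fl 0 hflp (fun k hk hk0 => by omega)]
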